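-- pv_equiv track=rewrite | github.com/GabrielAngelAlvaTaibo/alvareztaibo_gabriel_pp__ | Package_Calculos/Especificas.py | informar_recaudacion
-- ===== SOURCE A (Python) =====
-- def informar_recaudacion(matriz):
--     """Informa cuál fue el/los clientes que enviaron más cantidad de paquetes medianos.
--
--     Args:
--         matriz (_type_): obtiene la matriz a medir
--
--     Returns:
--         _type_: Retorna el cliente que envio más cantidad de paquetes medianos
--     """
--     mayor_reacudacion = 0
--     cantidad_pequenos = 0
--     cantidad_medianos = 0
--     cantidad_grandes = 0
--     for i in range(0, len(matriz)):
--         for j in range(1, len(matriz[i])):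
--             match j:
--                 case 1:
--                     if matriz[i][j] > 0:
--                         cantidad_pequenos += matriz[i][j] * 1000
--                 case 2:
--                     if matriz[i][j] > 0:
--                         cantidad_medianos += matriz[i][j] * 1500
--                 case 3:
--                     if matriz[i][j] > 0:
--                         cantidad_grandes += matriz[i][j] * 2000
--
--     if cantidad_pequenos > cantidad_medianos and cantidad_pequenos > cantidad_grandes:
--         mayor_reacudacion = cantidad_pequenos
--     else:
--         if cantidad_medianos > cantidad_grandes:
--             mayor_reacudacion = cantidad_medianos
--         else:
--             mayor_reacudacion = cantidad_grandes
--
--     mensaje = f"""Reacaudacion: \nPequenos: {cantidad_pequenos}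
-- Medianos: {cantidad_medianos}\nGrandes: {cantidad_grandes}
-- El tamaño que más recaudó fue {mayor_reacudacion}"""
--
--     return mensaje
-- ===== SOURCE B (Python) =====
-- def informar_recaudacion(matriz):
--     def total(k, w):
--         return sum(fila[k] * w for fila in matriz if len(fila) > k and fila[k] > 0)
--
--     cantidad_pequenos = total(1, 1000)
--     cantidad_medianos = total(2, 1500)
--     cantidad_grandes = total(3, 2000)
--     mayor_reacudacion = max(cantidad_pequenos, cantidad_medianos, cantidad_grandes)
--
--     return (f"Reacaudacion: \nPequenos: {cantidad_pequenos}"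
--             f"\nMedianos: {cantidad_medianos}\nGrandes: {cantidad_grandes}"
--             f"\nEl tamaño que más recaudó fue {mayor_reacudacion}")
-- ===== Notes on version B (the rewrite author's own statement) =====
-- stated objective: simpler
-- what changed: Replaces the index-driven double loop with a match statement by three direct guarded per-column sums over the rows, and replaces the conditional cascade by max(p, m, g).
import Mathlib
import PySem

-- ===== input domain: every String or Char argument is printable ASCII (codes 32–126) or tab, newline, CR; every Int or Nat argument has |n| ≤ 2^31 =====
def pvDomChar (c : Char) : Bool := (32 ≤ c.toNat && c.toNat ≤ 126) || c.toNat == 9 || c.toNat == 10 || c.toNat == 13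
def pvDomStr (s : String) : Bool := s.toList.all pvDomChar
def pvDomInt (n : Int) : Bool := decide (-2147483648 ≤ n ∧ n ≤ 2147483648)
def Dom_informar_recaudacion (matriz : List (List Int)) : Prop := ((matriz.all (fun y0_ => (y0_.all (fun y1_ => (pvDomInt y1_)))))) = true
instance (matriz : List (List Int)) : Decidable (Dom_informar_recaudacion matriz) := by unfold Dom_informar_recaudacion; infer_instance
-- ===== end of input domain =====

-- ===== PORT A =====
-- Header: B replaces A's index-match double loop by three guarded per-column sums and
-- the conditional cascade by max(p, m, g) (objective: simpler); same return value.
def pvStepA (row : List Int) (s : Int × Int × Int) (j : Int) : Int × Int × Int :=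
  if j = 1 then
    (if 0 < PySem.List.pyGetD row j 0 then (s.1 + PySem.List.pyGetD row j 0 * 1000, s.2.1, s.2.2) else s)
  else if j = 2 then
    (if 0 < PySem.List.pyGetD row j 0 then (s.1, s.2.1 + PySem.List.pyGetD row j 0 * 1500, s.2.2) else s)
  else if j = 3 then
    (if 0 < PySem.List.pyGetD row j 0 then (s.1, s.2.1, s.2.2 + PySem.List.pyGetD row j 0 * 2000) else s)
  else s

def informar_recaudacion (matriz : List (List Int)) : String :=
  let s := matriz.foldl
    (fun s row => (PySem.List.pyRange 1 (row.length : Int) 1).foldl (pvStepA row) s)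
    (0, 0, 0)
  let cantidad_pequenos := s.1
  let cantidad_medianos := s.2.1
  let cantidad_grandes := s.2.2
  let mayor_reacudacion :=
    if cantidad_pequenos > cantidad_medianos ∧ cantidad_pequenos > cantidad_grandes then
      cantidad_pequenos
    else if cantidad_medianos > cantidad_grandes then cantidad_medianos
    else cantidad_grandes
  "Reacaudacion: \nPequenos: " ++ PySem.Int.toStr cantidad_pequenos ++
    "\nMedianos: " ++ PySem.Int.toStr cantidad_medianos ++
    "\nGrandes: " ++ PySem.Int.toStr cantidad_grandes ++
    "\nEl tamaño que más recaudó fue " ++ PySem.Int.toStr mayor_reacudacion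

-- ===== PORT B =====
def pvTotalB (matriz : List (List Int)) (k : Nat) (w : Int) : Int :=
  ((matriz.filter (fun fila => decide (k < fila.length) && decide (0 < fila.getD k 0))).map
    (fun fila => fila.getD k 0 * w)).sum

def informar_recaudacion_alt (matriz : List (List Int)) : String :=
  let cantidad_pequenos := pvTotalB matriz 1 1000
  let cantidad_medianos := pvTotalB matriz 2 1500
  let cantidad_grandes := pvTotalB matriz 3 2000
  let mayor_reacudacion := max cantidad_pequenos (max cantidad_medianos cantidad_grandes)
  "Reacaudacion: \nPequenos: " ++ PySem.Int.toStr cantidad_pequenos ++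
    "\nMedianos: " ++ PySem.Int.toStr cantidad_medianos ++
    "\nGrandes: " ++ PySem.Int.toStr cantidad_grandes ++
    "\nEl tamaño que más recaudó fue " ++ PySem.Int.toStr mayor_reacudacion

-- ===== PRECONDITION & SPEC =====
def Spec_informar_recaudacion (matriz : List (List Int)) (out : String) : Prop := out = informar_recaudacion_alt matriz
instance (matriz : List (List Int)) (out : String) : Decidable (Spec_informar_recaudacion matriz out) := by unfold Spec_informar_recaudacion; infer_instance

-- ===== CLAIM (what is proved, stated in full; the proofs are below) =====
def Claim_equal_informar_recaudacion : Prop := ∀ (matriz : List (List Int)), Dom_informar_recaudacion matriz → Spec_informar_recaudacion matriz (informar_recaudacion matriz)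

-- ===== LEMMAS AND PROOFS =====
def pvC (k : Nat) (w : Int) (row : List Int) : Int :=
  if k < row.length ∧ 0 < row.getD k 0 then row.getD k 0 * w else 0

theorem pvTotalB_cons (fila : List Int) (rest : List (List Int)) (k : Nat) (w : Int) :
    pvTotalB (fila :: rest) k w = pvC k w fila + pvTotalB rest k w := by
  by_cases h : k < fila.length ∧ 0 < fila.getD k 0
  · rw [pvTotalB, List.filter_cons, if_pos (by have h2 := h.2; rw [List.getD_eq_getElem _ _ h.1] at h2; simp [h.1, h2]), List.map_cons, List.sum_cons]
    rw [pvC, if_pos h, pvTotalB]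
  · rw [pvTotalB, List.filter_cons, if_neg (fun hc => h (by simpa using hc))]
    rw [pvC, if_neg h, pvTotalB, zero_add]

theorem pvTotalB_eq (matriz : List (List Int)) (k : Nat) (w : Int) :
    pvTotalB matriz k w = (matriz.map (pvC k w)).sum := by
  induction matriz with
  | nil => simp [pvTotalB]
  | cons fila rest ih => rw [pvTotalB_cons, ih, List.map_cons, List.sum_cons]

theorem pvStepA_ge4 (row : List Int) (s : Int × Int × Int) (j : Int) (h : 4 ≤ j) :
    pvStepA row s j = s := by
  have h1 : j ≠ 1 := by omega
  have h2 : j ≠ 2 := by omega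
  have h3 : j ≠ 3 := by omega
  simp [pvStepA, h1, h2, h3]

theorem pvInner_ge4 (row : List Int) (js : List Int) (hjs : ∀ j ∈ js, 4 ≤ j) :
    ∀ s : Int × Int × Int, js.foldl (pvStepA row) s = s := by
  induction js with
  | nil => intro s; simp
  | cons j rest ih =>
    intro s
    rw [List.foldl_cons, pvStepA_ge4 row s j (hjs j (by simp))]
    exact ih (fun j hj => hjs j (by simp [hj])) s

theorem pvInner_eq (row : List Int) (s : Int × Int × Int) :
    (PySem.List.pyRange 1 (row.length : Int) 1).foldl (pvStepA row) s =
      (s.1 + pvC 1 1000 row, s.2.1 + pvC 2 1500 row, s.2.2 + pvC 3 2000 row) := by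
  obtain ⟨p, m, g⟩ := s
  match row with
  | [] => simp [pvC]
  | [a] => simp [pvC]
  | [a, b] =>
    simp [PySem.List.pyRange_one, List.range_succ, pvStepA, pvC, PySem.List.pyGetD_ofNat']
    split_ifs <;> simp
  | [a, b, c] =>
    simp [PySem.List.pyRange_one, List.range_succ, pvStepA, pvC, PySem.List.pyGetD_ofNat']
    split_ifs <;> simp_all
  | a :: b :: c :: d :: rest =>
    have hlen : (4 : Int) ≤ ((a :: b :: c :: d :: rest).length : Int) := by
      simp; omega
    rw [PySem.List.pyRange_one_append 1 4 _ (by omega) hlen, List.foldl_append]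
    have h4 : PySem.List.pyRange 1 4 1 = [1, 2, 3] := by decide
    rw [h4,
      pvInner_ge4 _ _ (fun j hj => ((PySem.List.mem_pyRange_one).1 hj).1)]
    simp [pvStepA, pvC, PySem.List.pyGetD_ofNat']
    split_ifs <;> simp_all

theorem pvOuter_eq (matriz : List (List Int)) :
    ∀ s : Int × Int × Int,
      matriz.foldl
        (fun s row => (PySem.List.pyRange 1 (row.length : Int) 1).foldl (pvStepA row) s) s =
      (s.1 + (matriz.map (pvC 1 1000)).sum, s.2.1 + (matriz.map (pvC 2 1500)).sum,
        s.2.2 + (matriz.map (pvC 3 2000)).sum) := by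
  induction matriz with
  | nil => intro s; simp
  | cons row rest ih =>
    intro s
    rw [List.foldl_cons, pvInner_eq, ih]
    simp
    constructor
    · ring
    constructor
    · ring
    · ring

theorem pvCascade_eq (p m g : Int) :
    (if p > m ∧ p > g then p else if m > g then m else g) = max p (max m g) := by
  split_ifs <;> omega

-- ===== VERDICT (by name: the statement is the Claim_ definition above) =====
theorem informar_recaudacion_spec : Claim_equal_informar_recaudacion := by
  intro matriz _
  show informar_recaudacion matriz = informar_recaudacion_alt matriz
  unfold informar_recaudacion informar_recaudacion_alt
  rw [pvOuter_eq]
  simp only [pvTotalB_eq]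
  rw [pvCascade_eq]
  simp
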